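-- pv_equiv track=rewrite | github.com/tomMoulard/python-projetcs | perso/geoH.py | intListToBitList
-- ===== SOURCE A (Python) =====
-- def intToBitList(n):
-- 	res = []
-- 	for x in range(5):
-- 		res.append(n % 2)
-- 		n //= 2
-- 	return res
--
-- def reverseImpaire(l):
-- 	lenL = len(l)
-- 	for x in range(lenL // 2):
-- 		tmp = l[x]
-- 		l[x] = l[lenL - x - 1]
-- 		l[lenL - x - 1] = tmp
--
-- def intListToBitList(i):
-- 	res = []
-- 	for x in i:
-- 		l = intToBitList(x)
-- 		reverseImpaire(l)
-- 		for y in l: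
-- 			res.append(y)
-- 	return res
-- ===== SOURCE B (Python) =====
-- def intListToBitList(i):
--     return [int(b) for x in i for b in format(x % 32, '05b')]
-- ===== Notes on version B (the rewrite author's own statement) =====
-- stated objective: idiomatic
-- what changed: A extracts the low 5 bits LSB-first with repeated %2 and //2 and then reverses each 5-list with an in-place swap loop; B masks x & 31 and formats it as '05b', producing the big-endian bits directly in one comprehension with no helpers and no reversal.
import Mathlib
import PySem

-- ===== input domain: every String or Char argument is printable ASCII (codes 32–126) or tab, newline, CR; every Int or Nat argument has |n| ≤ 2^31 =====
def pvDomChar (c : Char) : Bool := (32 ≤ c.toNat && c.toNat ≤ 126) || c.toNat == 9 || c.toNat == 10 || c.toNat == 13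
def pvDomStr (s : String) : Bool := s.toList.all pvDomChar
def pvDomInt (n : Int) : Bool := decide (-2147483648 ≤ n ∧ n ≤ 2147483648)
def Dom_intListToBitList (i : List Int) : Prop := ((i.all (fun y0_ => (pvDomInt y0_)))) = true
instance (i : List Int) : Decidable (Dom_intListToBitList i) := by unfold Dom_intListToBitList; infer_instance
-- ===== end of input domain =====

-- B replaces A's LSB-first bit extraction plus in-place reversal by formatting x % 32 as '05b',
-- yielding the big-endian bits directly (objective: idiomatic; same cost).

-- ===== PORT A =====
def intToBitList (n : Int) : List Int :=
  ((List.range 5).foldl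
    (fun (s : List Int × Int) _ =>
      (s.1 ++ [PySem.Int.mod s.2 2], PySem.Int.floordiv s.2 2)) ([], n)).1

def reverseImpaire (l : List Int) : List Int :=
  let lenL := l.length
  (List.range (lenL / 2)).foldl
    (fun acc x =>
      let tmp := acc.getD x 0
      let acc' := acc.set x (acc.getD (lenL - x - 1) 0)
      acc'.set (lenL - x - 1) tmp) l

def intListToBitList (i : List Int) : List Int :=
  i.foldl (fun res x => res ++ reverseImpaire (intToBitList x)) []

-- ===== PORT B =====
-- format(m, '05b') for 0 ≤ m < 32 is ported as the five big-endian binary digits of m.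
def intListToBitList_alt (i : List Int) : List Int :=
  i.flatMap (fun x =>
    let m := PySem.Int.mod x 32
    [m / 16 % 2, m / 8 % 2, m / 4 % 2, m / 2 % 2, m % 2])

-- ===== PRECONDITION & SPEC =====
def Spec_intListToBitList (i : List Int) (out : List Int) : Prop := out = intListToBitList_alt i
instance (i : List Int) (out : List Int) : Decidable (Spec_intListToBitList i out) := by unfold Spec_intListToBitList; infer_instance

-- ===== CLAIM (what is proved, stated in full; the proofs are below) =====
def Claim_equal_intListToBitList : Prop := ∀ (i : List Int), Dom_intListToBitList i → Spec_intListToBitList i (intListToBitList i)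

-- ===== LEMMAS AND PROOFS =====
theorem perElem (x : Int) :
    reverseImpaire (intToBitList x) =
      [PySem.Int.mod x 32 / 16 % 2, PySem.Int.mod x 32 / 8 % 2, PySem.Int.mod x 32 / 4 % 2,
       PySem.Int.mod x 32 / 2 % 2, PySem.Int.mod x 32 % 2] := by
  have h : intToBitList x =
      [PySem.Int.mod x 2,
       PySem.Int.mod (PySem.Int.floordiv x 2) 2,
       PySem.Int.mod (PySem.Int.floordiv (PySem.Int.floordiv x 2) 2) 2,
       PySem.Int.mod (PySem.Int.floordiv (PySem.Int.floordiv (PySem.Int.floordiv x 2) 2) 2) 2,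
       PySem.Int.mod (PySem.Int.floordiv (PySem.Int.floordiv (PySem.Int.floordiv (PySem.Int.floordiv x 2) 2) 2) 2) 2] := by
    simp [intToBitList, List.range_succ]
  rw [h]
  simp only [reverseImpaire, List.length_cons, List.length_nil, List.range_succ, List.range_zero, List.getD]
  simp only [PySem.Int.mod_eq_emod_of_pos (show (0:Int) < 2 by norm_num),
    PySem.Int.mod_eq_emod_of_pos (show (0:Int) < 32 by norm_num),
    PySem.Int.floordiv_eq_ediv_of_pos (show (0:Int) < 2 by norm_num)]
  norm_num
  omega

-- ===== VERDICT (by name: the statement is the Claim_ definition above) =====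
theorem intListToBitList_spec : Claim_equal_intListToBitList := by
  intro i _
  unfold Spec_intListToBitList intListToBitList intListToBitList_alt
  simp only [perElem]
  rw [PySem.List.foldl_append_eq_flatMap]
  simp
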